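-- pv_equiv track=rewrite | github.com/jichengzhi/small-programs | tokenlizer.py | tokenlize
-- ===== SOURCE A (Python) =====
-- special = [';', ' ', '\n', '(', ')', '[', ']', '{', '}']
--
-- def tokenlize(code: str, ans):
--
--     if not code:
--         return ans
--
--     if code[0] in special:
--         ans.append(code[0])
--         return tokenlize(code[1:], ans)
--
--     token_len = 0
--
--     while token_len < len(code) and code[token_len] not in special:
--         token_len += 1
--
--     token = code[:token_len]
--
--     ans.append(token)
--     return tokenlize(code[token_len:], ans)
-- ===== SOURCE B (Python) =====
-- special = [';', ' ', '\n', '(', ')', '[', ']', '{', '}']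
--
-- def tokenlize(code: str, ans):
--     # single linear scan with index pointers; the remaining code is never
--     # sliced off and copied. Same in-place mutation of ans as A.
--     i, n = 0, len(code)
--     while i < n:
--         c = code[i]
--         if c in special:
--             ans.append(c)
--             i += 1
--         else:
--             j = i
--             while j < n and code[j] not in special:
--                 j += 1
--             ans.append(code[i:j])
--             i = j
--     return ans
-- ===== Notes on version B (the rewrite author's own statement) =====
-- stated objective: alternative
-- what changed: Replaced A's recursion that slices off the consumed prefix of the string at every step with a single iterative scan using index pointers, so the remaining code is never copied.
import Mathlib
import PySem

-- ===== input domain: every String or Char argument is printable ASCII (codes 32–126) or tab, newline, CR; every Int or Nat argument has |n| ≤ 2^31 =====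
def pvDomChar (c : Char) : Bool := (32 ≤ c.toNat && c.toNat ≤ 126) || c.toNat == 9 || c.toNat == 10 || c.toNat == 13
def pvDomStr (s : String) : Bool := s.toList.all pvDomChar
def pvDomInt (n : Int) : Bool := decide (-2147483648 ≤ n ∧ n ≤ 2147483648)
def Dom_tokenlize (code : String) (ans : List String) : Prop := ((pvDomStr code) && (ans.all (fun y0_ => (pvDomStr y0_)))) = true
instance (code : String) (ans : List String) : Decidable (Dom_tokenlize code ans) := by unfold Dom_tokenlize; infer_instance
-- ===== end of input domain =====

-- B replaces A's slice-per-step recursion by one index-pointer scan (no slices of the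
-- remaining code); both A and B mutate ans in place the same way, equivalence is on the return value.

-- ===== PORT A =====
def pvSpecial : List Char := [';', ' ', '\n', '(', ')', '[', ']', '{', '}']

-- A's while loop: token_len counted from the front of the remaining code
def pvTokLen : List Char → Nat
  | [] => 0
  | c :: rest => if c ∈ pvSpecial then 0 else pvTokLen rest + 1

def pvTokAux : List Char → List String → List String
  | [], ans => ans
  | c :: rest, ans =>
    if c ∈ pvSpecial then
      pvTokAux rest (ans ++ [String.ofList [c]])
    else
      let tl := pvTokLen (c :: rest)
      pvTokAux ((c :: rest).drop tl) (ans ++ [String.ofList ((c :: rest).take tl)])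
termination_by cs _ => cs.length
decreasing_by
  · simp
  · simp only [pvTokLen, if_neg ‹_›, List.length_drop, List.length_cons]; omega

def tokenlize (code : String) (ans : List String) : List String :=
  pvTokAux code.toList ans

-- ===== PORT B =====
-- B's inner while loop: advance j past non-special characters
def pvScan (cs : List Char) (j : Nat) : Nat :=
  if h : j < cs.length then
    if cs[j] ∈ pvSpecial then j else pvScan cs (j + 1)
  else j
termination_by cs.length - j

-- needed by pvAltLoop's termination (the scan strictly advances past a non-special char)
theorem pvScan_ge (cs : List Char) (j : Nat) : j ≤ pvScan cs j := by
  rw [pvScan]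
  split
  · split
    · exact Nat.le_refl j
    · have := pvScan_ge cs (j + 1); omega
  · exact Nat.le_refl j
termination_by cs.length - j

theorem pvScan_gt (cs : List Char) (i : Nat) (h : i < cs.length)
    (hs : cs[i] ∉ pvSpecial) : i < pvScan cs i := by
  rw [pvScan, dif_pos h, if_neg hs]
  have := pvScan_ge cs (i + 1); omega

def pvAltLoop (cs : List Char) (i : Nat) (ans : List String) : List String :=
  if h : i < cs.length then
    if cs[i] ∈ pvSpecial then
      pvAltLoop cs (i + 1) (ans ++ [String.ofList [cs[i]]])
    else
      let j := pvScan cs i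
      -- code[i:j] with 0 ≤ i ≤ j ≤ n: exactly (drop i).take (j - i)
      pvAltLoop cs j (ans ++ [String.ofList ((cs.drop i).take (j - i))])
  else ans
termination_by cs.length - i
decreasing_by
  · omega
  · have := pvScan_gt cs i h ‹_›; omega

def tokenlize_alt (code : String) (ans : List String) : List String :=
  pvAltLoop code.toList 0 ans

-- ===== PRECONDITION & SPEC =====
def Spec_tokenlize (code : String) (ans : List String) (out : List String) : Prop := out = tokenlize_alt code ans
instance (code : String) (ans : List String) (out : List String) : Decidable (Spec_tokenlize code ans out) := by unfold Spec_tokenlize; infer_instance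

-- ===== CLAIM (what is proved, stated in full; the proofs are below) =====
def Claim_equal_tokenlize : Prop := ∀ (code : String) (ans : List String), Dom_tokenlize code ans → Spec_tokenlize code ans (tokenlize code ans)

-- ===== LEMMAS AND PROOFS =====
theorem pvScan_eq (cs : List Char) (j : Nat) :
    pvScan cs j = j + pvTokLen (cs.drop j) := by
  rw [pvScan]
  split
  · rename_i h
    rw [List.drop_eq_getElem_cons h]
    split
    · simp [pvTokLen, ‹_›]
    · rw [pvScan_eq cs (j + 1)]
      simp only [pvTokLen, if_neg ‹_›]
      omega
  · rename_i h
    rw [List.drop_eq_nil_iff.mpr (by omega)]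
    simp [pvTokLen]
termination_by cs.length - j

theorem pvAltLoop_eq (cs : List Char) (i : Nat) (ans : List String) :
    pvAltLoop cs i ans = pvTokAux (cs.drop i) ans := by
  by_cases h : i < cs.length
  · have hd := List.drop_eq_getElem_cons h
    by_cases hs : cs[i] ∈ pvSpecial
    · rw [pvAltLoop, dif_pos h, if_pos hs, pvAltLoop_eq cs (i + 1), hd]
      simp only [pvTokAux, if_pos hs]
    · have hj : pvScan cs i = i + pvTokLen (cs.drop i) := pvScan_eq cs i
      have htl : 1 ≤ pvTokLen (cs.drop i) := by
        rw [hd]; simp only [pvTokLen, if_neg hs]; omega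
      rw [pvAltLoop, dif_pos h, if_neg hs, pvAltLoop_eq cs (pvScan cs i)]
      conv_rhs => rw [hd]
      simp only [pvTokAux, if_neg hs]
      rw [← hd, hj, Nat.add_sub_cancel_left, List.drop_drop, Nat.add_comm i]
  · rw [pvAltLoop, dif_neg h, List.drop_eq_nil_iff.mpr (by omega)]
    simp [pvTokAux]
termination_by cs.length - i
decreasing_by
  · omega
  · have := pvScan_gt cs i h hs; omega

-- ===== VERDICT (by name: the statement is the Claim_ definition above) =====
theorem tokenlize_spec : Claim_equal_tokenlize := by
  intro code ans _
  unfold Spec_tokenlize tokenlize tokenlize_alt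
  rw [pvAltLoop_eq]
  simp
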